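-- pv_equiv track=rewrite | github.com/beauthi/contests | Code Jam/2020/vestigium.py | rep_col
-- ===== SOURCE A (Python) =====
-- def rep_col(matrix):
--     result = 0
--     for col in range(len(matrix)):
--         column = []
--         for row in matrix:
--             column.append(row[col])
--         if (len(set(column))) != len(column):
--             result += 1
--     return result
-- ===== SOURCE B (Python) =====
-- def rep_col(matrix):
--     n = len(matrix)
--     seen = [set() for _ in range(n)]
--     dirty = set()
--     for row in matrix:
--         for col in range(n):
--             v = row[col]
--             if v in seen[col]:
--                 dirty.add(col)
--             else:
--                 seen[col].add(v)
--     return len(dirty)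
-- ===== Notes on version B (the rewrite author's own statement) =====
-- stated objective: alternative
-- what changed: Replaces A's column-major decomposition (rebuild each column as a list, then compare set size) with a single row-major pass that maintains one running set per column plus a set of column indices seen to repeat.
import Mathlib
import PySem

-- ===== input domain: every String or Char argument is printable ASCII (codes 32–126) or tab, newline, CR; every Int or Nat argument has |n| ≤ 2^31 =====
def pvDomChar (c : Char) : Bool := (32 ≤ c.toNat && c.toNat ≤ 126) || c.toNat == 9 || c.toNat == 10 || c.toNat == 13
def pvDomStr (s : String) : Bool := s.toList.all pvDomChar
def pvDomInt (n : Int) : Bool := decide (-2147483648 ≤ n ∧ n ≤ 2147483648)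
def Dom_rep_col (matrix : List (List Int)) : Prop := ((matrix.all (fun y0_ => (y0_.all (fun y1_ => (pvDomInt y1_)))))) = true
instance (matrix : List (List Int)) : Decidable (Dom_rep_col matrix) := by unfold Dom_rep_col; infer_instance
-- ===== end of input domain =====

-- B replaces A's column-major decomposition (rebuild each column as a list, compare set size)
-- by one row-major pass keeping a running set per column plus a set of repeat-carrying column
-- indices (alternative decomposition, same cost).

-- ===== PORT A =====
-- row[col] is PySem.List.pyGetD … 0: the default is never read on Pre_rep_col (IndexError inputs are excluded there)
def rep_col (matrix : List (List Int)) : Int :=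
  (PySem.List.pyRange 0 (matrix.length : Int)).foldl
    (fun result col =>
      let column := matrix.foldl (fun acc row => acc ++ [PySem.List.pyGetD row col 0]) []
      if (PySem.Set.ofList column).length ≠ column.length then result + 1 else result) 0

-- ===== PORT B =====
-- body of Source B's inner loop: read v = row[col]; mark col dirty if already seen, else grow seen[col]
def innerF (row : List Int) (st : List (PySem.Set Int) × PySem.Set Nat) (col : Nat) :
    List (PySem.Set Int) × PySem.Set Nat :=
  let v := PySem.List.pyGetD row (col : Int) 0
  if v ∈ st.1.getD col [] then (st.1, st.2.add col)
  else (st.1.set col ((st.1.getD col []).add v), st.2)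

-- one row of Source B's outer loop: for col in range(n)
def repColStep (n : Nat) (st : List (PySem.Set Int) × PySem.Set Nat) (row : List Int) :
    List (PySem.Set Int) × PySem.Set Nat :=
  (List.range n).foldl (innerF row) st

def rep_col_alt (matrix : List (List Int)) : Int :=
  ((matrix.foldl (repColStep matrix.length)
      (List.replicate matrix.length [], ([] : PySem.Set Nat))).2.length : Int)

-- ===== PRECONDITION & SPEC =====
-- Pre_ excludes exactly the inputs where Python A raises IndexError: some row shorter than the number of rows.
def Pre_rep_col (matrix : List (List Int)) : Prop := ∀ row ∈ matrix, matrix.length ≤ row.length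
instance (matrix : List (List Int)) : Decidable (Pre_rep_col matrix) := by unfold Pre_rep_col; infer_instance
def pvWitness_rep_col : List (List Int) := [[1, 1], [1, 2]]
def Spec_rep_col (matrix : List (List Int)) (out : Int) : Prop := out = rep_col_alt matrix
instance (matrix : List (List Int)) (out : Int) : Decidable (Spec_rep_col matrix out) := by unfold Spec_rep_col; infer_instance

-- ===== CLAIM (what is proved, stated in full; the proofs are below) =====
def Claim_equal_rep_col : Prop := ∀ (matrix : List (List Int)), Dom_rep_col matrix → Pre_rep_col matrix → Spec_rep_col matrix (rep_col matrix)

-- ===== LEMMAS AND PROOFS =====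

-- the value B reads at cell (row, c), and the column list A builds
def colv (row : List Int) (c : Nat) : Int := PySem.List.pyGetD row (c : Int) 0
def colOf (P : List (List Int)) (c : Nat) : List Int := P.map (fun row => colv row c)

-- the invariant of B's outer loop, after processing the row prefix P
def RInv (n : Nat) (P : List (List Int)) (st : List (PySem.Set Int) × PySem.Set Nat) : Prop :=
  st.1.length = n ∧
  (∀ c, c < n → st.1.getD c [] = PySem.Set.ofList (colOf P c)) ∧
  st.2.Nodup ∧
  (∀ c, c ∈ st.2 ↔ c < n ∧ ¬ (colOf P c).Nodup)

lemma ofList_length_lt_of_not_nodup (l : List Int) (hnd : ¬ l.Nodup) :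
    (PySem.Set.ofList l).length < l.length := by
  induction l with
  | nil => simp at hnd
  | cons x xs ih =>
    rw [PySem.Set.ofList_cons]
    by_cases hx : x ∈ xs
    · have hx' : x ∈ PySem.Set.ofList xs := (PySem.Set.mem_ofList xs x).2 hx
      have hlt : ((PySem.Set.ofList xs).discard x).length < (PySem.Set.ofList xs).length := by
        simp only [PySem.Set.discard]
        exact List.length_filter_lt_length_iff_exists.2 ⟨x, hx', by simp⟩
      have hle := PySem.Set.length_ofList_le xs
      simp only [List.length_cons]
      omega
    · have hnd' : ¬ xs.Nodup := fun h' => hnd (List.nodup_cons.2 ⟨hx, h'⟩)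
      have hlt' := ih hnd'
      have hle : ((PySem.Set.ofList xs).discard x).length ≤ (PySem.Set.ofList xs).length := by
        simp only [PySem.Set.discard]; exact List.length_filter_le _ _
      simp only [List.length_cons]
      omega

lemma ofList_length_eq_iff (l : List Int) :
    (PySem.Set.ofList l).length = l.length ↔ l.Nodup := by
  constructor
  · intro h
    by_contra hnd
    have := ofList_length_lt_of_not_nodup l hnd
    omega
  · intro h; rw [PySem.Set.ofList_eq_self_of_nodup l h]

lemma nodup_append_singleton (l : List Int) (v : Int) :
    (l ++ [v]).Nodup ↔ l.Nodup ∧ v ∉ l := by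
  simp [List.nodup_append]
  intro _
  constructor
  · intro h hv; exact h v hv rfl
  · intro h a ha he; exact h (he ▸ ha)

lemma colOf_append (P : List (List Int)) (row : List Int) (c : Nat) :
    colOf (P ++ [row]) c = colOf P c ++ [colv row c] := by
  simp [colOf]

-- B's inner loop: after cols 0..k-1 of one row, exactly those columns are advanced to P ++ [row]
lemma inner_inv (n : Nat) (P : List (List Int)) (row : List Int)
    (st : List (PySem.Set Int) × PySem.Set Nat) (h : RInv n P st) :
    ∀ k, k ≤ n →
      ((List.range k).foldl (innerF row) st).1.length = n ∧
      (∀ c, c < n → ((List.range k).foldl (innerF row) st).1.getD c [] =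
        PySem.Set.ofList (colOf (if c < k then P ++ [row] else P) c)) ∧
      ((List.range k).foldl (innerF row) st).2.Nodup ∧
      (∀ c, c ∈ ((List.range k).foldl (innerF row) st).2 ↔
        c < n ∧ ¬ (colOf (if c < k then P ++ [row] else P) c).Nodup) := by
  intro k
  induction k with
  | zero =>
    intro _
    obtain ⟨h1, h2, h3, h4⟩ := h
    simp only [List.range_zero, List.foldl_nil]
    refine ⟨h1, ?_, h3, ?_⟩
    · intro c hc; rw [if_neg (Nat.not_lt_zero c)]; exact h2 c hc
    · intro c; rw [if_neg (Nat.not_lt_zero c)]; exact h4 c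
  | succ k ih =>
    intro hk
    obtain ⟨g1, g2, g3, g4⟩ := ih (Nat.le_of_succ_le hk)
    have hkn : k < n := hk
    have hfold : (List.range (k+1)).foldl (innerF row) st =
        innerF row ((List.range k).foldl (innerF row) st) k := by
      rw [List.range_succ, List.foldl_append, List.foldl_cons, List.foldl_nil]
    set G := (List.range k).foldl (innerF row) st with hG
    have hseenk : G.1.getD k [] = PySem.Set.ofList (colOf P k) := by
      have := g2 k hkn
      rwa [if_neg (Nat.lt_irrefl k)] at this
    rw [hfold]
    by_cases hmem : PySem.List.pyGetD row (k : Int) 0 ∈ G.1.getD k []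
    · -- value already seen in column k: mark k dirty
      have hst : innerF row G k = (G.1, G.2.add k) := by
        unfold innerF
        rw [if_pos hmem]
      rw [hst]
      have hvP : colv row k ∈ colOf P k := by
        rw [hseenk] at hmem; exact (PySem.Set.mem_ofList _ _).1 hmem
      have hdupk : ¬ (colOf (P ++ [row]) k).Nodup := by
        rw [colOf_append, nodup_append_singleton]
        exact fun hc => hc.2 hvP
      refine ⟨g1, ?_, PySem.Set.nodup_add _ _ g3, ?_⟩
      · intro c hc
        by_cases hck : c = k
        · subst hck
          rw [if_pos (Nat.lt_succ_self c), colOf_append, PySem.Set.ofList_append_singleton,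
            PySem.Set.add_of_mem ((PySem.Set.mem_ofList _ _).2 hvP)]
          exact hseenk
        · by_cases hlt : c < k
          · rw [if_pos (by omega)]; have := g2 c hc; rwa [if_pos hlt] at this
          · rw [if_neg (by omega)]; have := g2 c hc; rwa [if_neg hlt] at this
      · intro c
        rw [PySem.Set.mem_add]
        by_cases hck : c = k
        · subst hck
          rw [if_pos (Nat.lt_succ_self c)]
          exact ⟨fun _ => ⟨hkn, hdupk⟩, fun _ => Or.inr rfl⟩
        · constructor
          · rintro (hc' | hceq)
            · rcases (g4 c).1 hc' with ⟨hcn, hnd⟩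
              refine ⟨hcn, ?_⟩
              by_cases hlt : c < k
              · rw [if_pos (by omega)]; rwa [if_pos hlt] at hnd
              · rw [if_neg (by omega)]; rwa [if_neg hlt] at hnd
            · exact absurd hceq hck
          · rintro ⟨hcn, hnd⟩
            left
            apply (g4 c).2
            refine ⟨hcn, ?_⟩
            by_cases hlt : c < k
            · rw [if_pos hlt]; rwa [if_pos (by omega)] at hnd
            · rw [if_neg hlt]; rwa [if_neg (by omega)] at hnd
    · -- new value: insert it into seen[k]
      have hst : innerF row G k = (G.1.set k ((G.1.getD k []).add (PySem.List.pyGetD row (k : Int) 0)), G.2) := by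
        unfold innerF
        rw [if_neg hmem]
      rw [hst]
      have hvP : colv row k ∉ colOf P k := fun hv' =>
        hmem (hseenk ▸ (PySem.Set.mem_ofList _ _).2 hv')
      have hnodupk : (colOf (P ++ [row]) k).Nodup ↔ (colOf P k).Nodup := by
        rw [colOf_append, nodup_append_singleton]
        exact ⟨And.left, fun h => ⟨h, hvP⟩⟩
      refine ⟨by rw [List.length_set]; exact g1, ?_, g3, ?_⟩
      · intro c hc
        by_cases hck : c = k
        · subst hck
          rw [if_pos (Nat.lt_succ_self c), List.getD_eq_getElem?_getD,
            List.getElem?_set_self (by rw [g1]; exact hkn)]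
          rw [colOf_append, PySem.Set.ofList_append_singleton, hseenk]
          rfl
        · rw [List.getD_eq_getElem?_getD, List.getElem?_set_ne (fun h => hck h.symm),
            ← List.getD_eq_getElem?_getD]
          by_cases hlt : c < k
          · rw [if_pos (by omega)]; have := g2 c hc; rwa [if_pos hlt] at this
          · rw [if_neg (by omega)]; have := g2 c hc; rwa [if_neg hlt] at this
      · intro c
        by_cases hck : c = k
        · subst hck
          rw [if_pos (Nat.lt_succ_self c)]
          have := g4 c
          rw [if_neg (Nat.lt_irrefl c)] at this
          rw [this]
          exact ⟨fun ⟨a, b⟩ => ⟨a, fun h => b (hnodupk.1 h)⟩,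
            fun ⟨a, b⟩ => ⟨a, fun h => b (hnodupk.2 h)⟩⟩
        · have := g4 c
          by_cases hlt : c < k
          · rw [if_pos (by omega)]; rwa [if_pos hlt] at this
          · rw [if_neg (by omega)]; rwa [if_neg hlt] at this

lemma step_inv (n : Nat) (P : List (List Int)) (row : List Int)
    (st : List (PySem.Set Int) × PySem.Set Nat) (h : RInv n P st) :
    RInv n (P ++ [row]) (repColStep n st row) := by
  obtain ⟨h1, h2, h3, h4⟩ := inner_inv n P row st h n (le_refl n)
  refine ⟨h1, ?_, h3, ?_⟩
  · intro c hc
    have := h2 c hc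
    rwa [if_pos hc] at this
  · intro c
    have := h4 c
    by_cases hc : c < n
    · rwa [if_pos hc] at this
    · rw [if_neg hc] at this
      rw [repColStep, this]
      constructor
      · rintro ⟨hcn, -⟩; exact absurd hcn hc
      · rintro ⟨hcn, -⟩; exact absurd hcn hc

lemma outer_inv (n : Nat) (rows : List (List Int)) :
    ∀ (P : List (List Int)) (st : List (PySem.Set Int) × PySem.Set Nat),
      RInv n P st → RInv n (P ++ rows) (rows.foldl (repColStep n) st) := by
  induction rows with
  | nil => intro P st h; simpa using h
  | cons r rs ih =>
    intro P st h
    have h1 := step_inv n P r st h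
    have := ih (P ++ [r]) (repColStep n st r) h1
    simpa using this

lemma init_inv (n : Nat) : RInv n [] (List.replicate n [], ([] : PySem.Set Nat)) := by
  refine ⟨by simp, ?_, by simp, ?_⟩
  · intro c hc
    simp [colOf, PySem.Set.ofList, List.getD_eq_getElem?_getD, hc]
  · intro c; simp [colOf]

lemma rep_col_eq_count (matrix : List (List Int)) :
    rep_col matrix =
      ((List.range matrix.length).countP (fun c => decide (¬ (colOf matrix c).Nodup)) : Int) := by
  unfold rep_col
  rw [PySem.List.pyRange_zero_natCast, List.foldl_map]
  have hcol : ∀ c : Nat,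
      matrix.foldl (fun acc row => acc ++ [PySem.List.pyGetD row (c : Int) 0]) [] = colOf matrix c := by
    intro c
    rw [PySem.List.foldl_append_singleton_eq_map]
    simp [colOf, colv]
  rw [PySem.List.foldl_congr_mem _ _
      (fun result k => if decide (¬ (colOf matrix k).Nodup) = true then result + 1 else result) 0 ?_]
  · rw [PySem.List.foldl_count_if]
    simp
  · intro acc k _
    simp only [hcol]
    by_cases hnd : (colOf matrix k).Nodup
    · simp [hnd, (ofList_length_eq_iff (colOf matrix k)).2 hnd]
    · have hne : (PySem.Set.ofList (colOf matrix k)).length ≠ (colOf matrix k).length := by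
        intro h; exact hnd ((ofList_length_eq_iff _).1 h)
      simp [hnd, hne]

lemma dirty_length (matrix : List (List Int)) :
    ((matrix.foldl (repColStep matrix.length)
        (List.replicate matrix.length [], ([] : PySem.Set Nat))).2).length
      = (List.range matrix.length).countP (fun c => decide (¬ (colOf matrix c).Nodup)) := by
  obtain ⟨-, -, hnd, hmem⟩ :=
    (by simpa using outer_inv matrix.length matrix [] _ (init_inv matrix.length) :
      RInv matrix.length matrix
        (matrix.foldl (repColStep matrix.length) (List.replicate matrix.length [], ([] : PySem.Set Nat))))
  rw [List.countP_eq_length_filter]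
  have hperm : ((matrix.foldl (repColStep matrix.length)
      (List.replicate matrix.length [], ([] : PySem.Set Nat))).2).Perm
      ((List.range matrix.length).filter (fun c => decide (¬ (colOf matrix c).Nodup))) := by
    rw [List.perm_ext_iff_of_nodup hnd (List.Nodup.filter _ List.nodup_range)]
    intro c
    rw [hmem c]
    simp [List.mem_filter, List.mem_range, and_comm]
  exact hperm.length_eq

-- ===== VERDICT (by name: the statement is the Claim_ definition above) =====
theorem rep_col_spec : Claim_equal_rep_col := by
  intro matrix _ _
  unfold Spec_rep_col rep_col_alt
  rw [rep_col_eq_count, dirty_length]
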